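-- pv_equiv track=rewrite | github.com/dev-boz/agent-interface-protocol | aip/hook_configs.py | _ensure_codex_hooks_enabled
-- ===== SOURCE A (Python) =====
-- def _ensure_codex_hooks_enabled(text: str) -> str:
--     if "[features]" not in text:
--         prefix = text.rstrip()
--         if prefix:
--             prefix += "\n\n"
--         return prefix + "[features]\ncodex_hooks = true\n"
--
--     lines = text.splitlines()
--     in_features = False
--     inserted = False
--     result: list[str] = []
--     for line in lines:
--         stripped = line.strip()
--         if stripped.startswith("[") and stripped.endswith("]"):
--             if in_features and not inserted:
--                 result.append("codex_hooks = true")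
--                 inserted = True
--             in_features = stripped == "[features]"
--             result.append(line)
--             continue
--         if in_features and stripped.startswith("codex_hooks"):
--             result.append("codex_hooks = true")
--             inserted = True
--             continue
--         result.append(line)
--     if in_features and not inserted:
--         result.append("codex_hooks = true")
--     return "\n".join(result).rstrip() + "\n"
-- ===== SOURCE B (Python) =====
-- def _ensure_codex_hooks_enabled(text: str) -> str:
--     if "[features]" not in text:
--         prefix = text.rstrip()
--         if prefix:
--             prefix += "\n\n"
--         return prefix + "[features]\ncodex_hooks = true\n"
--
--     def is_header(line: str) -> bool:
--         s = line.strip()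
--         return s.startswith("[") and s.endswith("]")
--
--     lines = text.splitlines()
--     # split into preamble + sections (each section begins at a header line)
--     k = 0
--     while k < len(lines) and not is_header(lines[k]):
--         k += 1
--     out = lines[:k]
--     first_features_seen = False
--     while k < len(lines):
--         header = lines[k]
--         k += 1
--         start = k
--         while k < len(lines) and not is_header(lines[k]):
--             k += 1
--         body = lines[start:k]
--         out.append(header)
--         if header.strip() == "[features]":
--             has_hook = any(l.strip().startswith("codex_hooks") for l in body)
--             out.extend("codex_hooks = true" if l.strip().startswith("codex_hooks") else l
--                        for l in body)
--             if not first_features_seen and not has_hook: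
--                 out.append("codex_hooks = true")
--             first_features_seen = True
--         else:
--             out.extend(body)
--     return "\n".join(out).rstrip() + "\n"
-- ===== Notes on version B (the rewrite author's own statement) =====
-- stated objective: alternative
-- what changed: B replaces A's single-pass three-flag state machine by a section-based decomposition: it splits the lines into a preamble and header-delimited sections, rewrites the hook lines inside each features section with a map, and appends the missing enabling line at the end of the first features section instead of carrying an insertion flag across the whole scan.
import Mathlib
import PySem

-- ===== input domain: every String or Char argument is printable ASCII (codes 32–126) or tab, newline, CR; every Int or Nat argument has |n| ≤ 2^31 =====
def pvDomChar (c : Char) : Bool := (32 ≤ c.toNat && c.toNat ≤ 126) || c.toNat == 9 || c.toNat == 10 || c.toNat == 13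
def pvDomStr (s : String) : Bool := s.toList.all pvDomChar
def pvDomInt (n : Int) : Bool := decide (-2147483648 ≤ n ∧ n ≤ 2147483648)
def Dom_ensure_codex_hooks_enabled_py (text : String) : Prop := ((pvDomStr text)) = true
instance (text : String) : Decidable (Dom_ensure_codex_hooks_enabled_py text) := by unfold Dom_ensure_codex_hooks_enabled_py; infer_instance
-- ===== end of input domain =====

-- B re-implements A by a section-based decomposition (preamble + header-delimited sections)
-- instead of A's single-pass in_features/inserted state machine; same return value, same cost.

-- ===== PORT A =====
-- literal port of A's loop body as a foldl step over (in_features, inserted, result)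
def pvStepA (st : Bool × Bool × List String) (line : String) : Bool × Bool × List String :=
  let stripped := PySem.Str.strip line
  if PySem.Str.startswith stripped "[" && PySem.Str.endswith stripped "]" then
    let st2 : Bool × List String :=
      if st.1 && !st.2.1 then (true, st.2.2 ++ ["codex_hooks = true"]) else (st.2.1, st.2.2)
    (stripped == "[features]", st2.1, st2.2 ++ [line])
  else if st.1 && PySem.Str.startswith stripped "codex_hooks" then
    (st.1, true, st.2.2 ++ ["codex_hooks = true"])
  else
    (st.1, st.2.1, st.2.2 ++ [line])

def ensure_codex_hooks_enabled_py (text : String) : String :=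
  if PySem.Str.isIn "[features]" text = false then
    let pfx := PySem.Str.rstrip text
    let pfx := if pfx ≠ "" then pfx ++ "\n\n" else pfx
    pfx ++ "[features]\ncodex_hooks = true\n"
  else
    let lines := PySem.Str.splitlines text
    let st := lines.foldl pvStepA (false, false, [])
    let result := if st.1 && !st.2.1 then st.2.2 ++ ["codex_hooks = true"] else st.2.2
    PySem.Str.rstrip (PySem.Str.join "\n" result) ++ "\n"

-- ===== PORT B =====
def pvIsHeader (line : String) : Bool :=
  let s := PySem.Str.strip line
  PySem.Str.startswith s "[" && PySem.Str.endswith s "]"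

def pvIsHook (line : String) : Bool :=
  PySem.Str.startswith (PySem.Str.strip line) "codex_hooks"

-- B's section loop: each call consumes one header plus its body (span up to the next header)
def pvAltGo (firstSeen : Bool) : List String → List String
  | [] => []
  | header :: rest =>
    let body := rest.takeWhile (fun l => !pvIsHeader l)
    let rest' := rest.dropWhile (fun l => !pvIsHeader l)
    if PySem.Str.strip header == "[features]" then
      let hasHook := body.any pvIsHook
      let nb := body.map (fun l => if pvIsHook l then "codex_hooks = true" else l)
      let nb2 := if !firstSeen && !hasHook then nb ++ ["codex_hooks = true"] else nb
      (header :: nb2) ++ pvAltGo true rest'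
    else
      (header :: body) ++ pvAltGo firstSeen rest'
  termination_by l => l.length
  decreasing_by
    all_goals
      simp only [List.length_cons]
      exact Nat.lt_succ_of_le (List.length_dropWhile_le _ _)

def ensure_codex_hooks_enabled_py_alt (text : String) : String :=
  if PySem.Str.isIn "[features]" text = false then
    let pfx := PySem.Str.rstrip text
    let pfx := if pfx ≠ "" then pfx ++ "\n\n" else pfx
    pfx ++ "[features]\ncodex_hooks = true\n"
  else
    let lines := PySem.Str.splitlines text
    let pre := lines.takeWhile (fun l => !pvIsHeader l)
    let rest := lines.dropWhile (fun l => !pvIsHeader l)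
    PySem.Str.rstrip (PySem.Str.join "\n" (pre ++ pvAltGo false rest)) ++ "\n"

-- ===== PRECONDITION & SPEC =====
def Spec_ensure_codex_hooks_enabled_py (text : String) (out : String) : Prop := out = ensure_codex_hooks_enabled_py_alt text
instance (text : String) (out : String) : Decidable (Spec_ensure_codex_hooks_enabled_py text out) := by unfold Spec_ensure_codex_hooks_enabled_py; infer_instance

-- ===== CLAIM (what is proved, stated in full; the proofs are below) =====
def Claim_equal_ensure_codex_hooks_enabled_py : Prop := ∀ (text : String), Dom_ensure_codex_hooks_enabled_py text → Spec_ensure_codex_hooks_enabled_py text (ensure_codex_hooks_enabled_py text)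

-- ===== LEMMAS AND PROOFS =====

-- A's final flush, as a function of the loop state
def pvFlush (st : Bool × Bool × List String) : List String :=
  if st.1 && !st.2.1 then st.2.2 ++ ["codex_hooks = true"] else st.2.2

-- A's loop rewritten recursively (accumulator dropped, final flush folded into the [] case)
def pvLoopA : Bool → Bool → List String → List String
  | inF, ins, [] => if inF && !ins then ["codex_hooks = true"] else []
  | inF, ins, l :: t =>
    if pvIsHeader l then
      (if inF && !ins then ["codex_hooks = true"] else []) ++
        l :: pvLoopA (PySem.Str.strip l == "[features]") (ins || inF) t
    else if inF && pvIsHook l then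
      "codex_hooks = true" :: pvLoopA inF true t
    else l :: pvLoopA inF ins t

-- one step of A's loop, phrased through the Bool helpers (definitionally equal to pvStepA)
theorem pvStepA_eq (st : Bool × Bool × List String) (line : String) :
    pvStepA st line =
      if pvIsHeader line then
        (PySem.Str.strip line == "[features]", st.2.1 || st.1,
          (if st.1 && !st.2.1 then st.2.2 ++ ["codex_hooks = true"] else st.2.2) ++ [line])
      else if st.1 && pvIsHook line then
        (st.1, true, st.2.2 ++ ["codex_hooks = true"])
      else (st.1, st.2.1, st.2.2 ++ [line]) := by
  show (if pvIsHeader line then _ else _) = _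
  by_cases hh : pvIsHeader line = true
  · rw [if_pos hh, if_pos hh]
    cases h1 : st.1 <;> cases h2 : st.2.1 <;> simp
  · rw [if_neg hh, if_neg hh]
    rfl

-- A's foldl + flush equals pvLoopA
theorem pvFoldA_eq (lines : List String) : ∀ (inF ins : Bool) (acc : List String),
    pvFlush (lines.foldl pvStepA (inF, ins, acc)) = acc ++ pvLoopA inF ins lines := by
  induction lines with
  | nil =>
    intro inF ins acc
    simp only [List.foldl_nil, pvFlush, pvLoopA]
    split <;> simp
  | cons l t ih =>
    intro inF ins acc
    rw [List.foldl_cons, pvStepA_eq]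
    by_cases hh : pvIsHeader l = true
    · rw [if_pos hh]
      rw [ih]
      simp only [pvLoopA, hh, if_true]
      cases inF <;> cases ins <;> simp
    · rw [if_neg hh]
      by_cases hc : (inF && pvIsHook l) = true
      · rw [if_pos hc, ih]
        simp only [pvLoopA, hh, Bool.false_eq_true, if_false, hc, if_true]
        rcases Bool.and_eq_true_iff.mp hc with ⟨h1, _⟩
        subst h1; simp
      · rw [if_neg hc, ih]
        simp only [pvLoopA, hh, Bool.false_eq_true, if_false, hc]
        simp

-- outside any [features] section, non-header lines pass through unchanged
theorem pvLoopA_nonhdr (pre : List String) (hpre : ∀ l ∈ pre, pvIsHeader l = false) :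
    ∀ (ins : Bool) (rest : List String),
    pvLoopA false ins (pre ++ rest) = pre ++ pvLoopA false ins rest := by
  induction pre with
  | nil => intro ins rest; simp
  | cons l t ih =>
    intro ins rest
    have hl : pvIsHeader l = false := hpre l (by simp)
    have ht : ∀ x ∈ t, pvIsHeader x = false := fun x hx => hpre x (by simp [hx])
    simp [pvLoopA, hl, ih ht]

-- inside a [features] section, a non-header body is rewritten by the map, and
-- 'inserted' picks up whether the body contained a codex_hooks line
theorem pvLoopA_body (body : List String) (hb : ∀ l ∈ body, pvIsHeader l = false) :
    ∀ (ins : Bool) (rest : List String),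
    pvLoopA true ins (body ++ rest) =
      body.map (fun l => if pvIsHook l then "codex_hooks = true" else l) ++
        pvLoopA true (ins || body.any pvIsHook) rest := by
  induction body with
  | nil => intro ins rest; simp
  | cons l t ih =>
    intro ins rest
    have hl : pvIsHeader l = false := hb l (by simp)
    have ht : ∀ x ∈ t, pvIsHeader x = false := fun x hx => hb x (by simp [hx])
    by_cases hk : pvIsHook l = true
    · simp [pvLoopA, hl, hk, ih ht]
    · have hk' : pvIsHook l = false := Bool.eq_false_iff.mpr hk
      simp [pvLoopA, hl, hk', ih ht]

-- the head of a dropWhile is [] or fails the predicate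
theorem pvDrop_head (p : String → Bool) (l : List String) :
    l.dropWhile p = [] ∨ ∃ x xs, l.dropWhile p = x :: xs ∧ p x = false := by
  cases h : l.dropWhile p with
  | nil => exact Or.inl rfl
  | cons x xs =>
    refine Or.inr ⟨x, xs, rfl, ?_⟩
    have := List.head_dropWhile_not p (l := l) (by simp [h])
    simpa [h] using this

-- main correspondence: from a header (or the end), A's state machine with
-- in_features = false and inserted = done computes exactly B's section loop
theorem pvMain : ∀ (n : Nat) (rest : List String), rest.length ≤ n →
    (rest = [] ∨ ∃ h t, rest = h :: t ∧ pvIsHeader h = true) →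
    ∀ (done : Bool), pvLoopA false done rest = pvAltGo done rest := by
  intro n
  induction n with
  | zero =>
    intro rest hlen hshape done
    have hnil : rest = [] := List.eq_nil_of_length_eq_zero (Nat.le_zero.mp hlen)
    subst hnil
    simp [pvLoopA, pvAltGo]
  | succ n ih =>
    intro rest hlen hshape done
    rcases hshape with rfl | ⟨h, t, rfl, hhd⟩
    · simp [pvLoopA, pvAltGo]
    · have hsplit : t.takeWhile (fun l => !pvIsHeader l) ++ t.dropWhile (fun l => !pvIsHeader l) = t :=
        List.takeWhile_append_dropWhile
      set body := t.takeWhile (fun l => !pvIsHeader l) with hbody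
      set rest' := t.dropWhile (fun l => !pvIsHeader l) with hrest'
      have hbnh : ∀ l ∈ body, pvIsHeader l = false := by
        intro l hl
        have := List.mem_takeWhile_imp hl
        simpa using this
      have hshape' : rest' = [] ∨ ∃ h2 t2, rest' = h2 :: t2 ∧ pvIsHeader h2 = true := by
        rcases pvDrop_head (fun l => !pvIsHeader l) t with h0 | ⟨x, xs, hx, hpx⟩
        · exact Or.inl h0
        · exact Or.inr ⟨x, xs, hx, by simpa using hpx⟩
      have hlen' : rest'.length ≤ n := by
        have h1 : rest'.length ≤ t.length := List.length_dropWhile_le _ _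
        have h2 : (h :: t).length = t.length + 1 := by simp
        omega
      -- unfold one step of A
      have hstep : pvLoopA false done (h :: t) =
          h :: pvLoopA (PySem.Str.strip h == "[features]") done t := by
        simp [pvLoopA, hhd]
      rw [hstep]
      by_cases hf : (PySem.Str.strip h == "[features]") = true
      · rw [hf]
        conv_lhs => rw [← hsplit]
        rw [pvLoopA_body body hbnh done rest']
        -- the pending insertion at the end of the section
        have hins : ∀ (d : Bool), pvLoopA true d rest' =
            (if !d then ["codex_hooks = true"] else []) ++ pvLoopA false true rest' := by
          intro d
          rcases hshape' with h0 | ⟨h2, t2, h0, hh2⟩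
          · rw [h0]; cases d <;> simp [pvLoopA]
          · rw [h0]
            simp only [pvLoopA, hh2, if_true]
            cases d <;> simp
        rw [hins, ih rest' hlen' hshape' true]
        rw [pvAltGo]
        rw [← hbody, ← hrest', if_pos hf]
        cases done <;> cases hhk : body.any pvIsHook <;>
          simp [List.append_assoc]
      · have hf' : (PySem.Str.strip h == "[features]") = false := Bool.eq_false_iff.mpr hf
        rw [hf']
        conv_lhs => rw [← hsplit]
        rw [pvLoopA_nonhdr body hbnh done rest', ih rest' hlen' hshape' done]
        rw [pvAltGo]
        rw [← hbody, ← hrest', if_neg hf]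
        simp

-- ===== VERDICT (by name: the statement is the Claim_ definition above) =====
set_option maxHeartbeats 1000000 in
theorem ensure_codex_hooks_enabled_py_spec : Claim_equal_ensure_codex_hooks_enabled_py := by
  intro text _
  unfold Spec_ensure_codex_hooks_enabled_py ensure_codex_hooks_enabled_py ensure_codex_hooks_enabled_py_alt
  by_cases h : PySem.Str.isIn "[features]" text = false
  · rw [if_pos h, if_pos h]
  · rw [if_neg h, if_neg h]
    set lines := PySem.Str.splitlines text with hlines
    have hfold := pvFoldA_eq lines false false []
    simp only [List.nil_append] at hfold
    have hsplit : lines.takeWhile (fun l => !pvIsHeader l) ++ lines.dropWhile (fun l => !pvIsHeader l) = lines :=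
      List.takeWhile_append_dropWhile
    have hpre : ∀ l ∈ lines.takeWhile (fun l => !pvIsHeader l), pvIsHeader l = false := by
      intro l hl; simpa using List.mem_takeWhile_imp hl
    have hshape : lines.dropWhile (fun l => !pvIsHeader l) = [] ∨
        ∃ h2 t2, lines.dropWhile (fun l => !pvIsHeader l) = h2 :: t2 ∧ pvIsHeader h2 = true := by
      rcases pvDrop_head (fun l => !pvIsHeader l) lines with h0 | ⟨x, xs, hx, hpx⟩
      · exact Or.inl h0
      · exact Or.inr ⟨x, xs, hx, by simpa using hpx⟩
    have hkey : pvLoopA false false lines =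
        lines.takeWhile (fun l => !pvIsHeader l) ++ pvAltGo false (lines.dropWhile (fun l => !pvIsHeader l)) := by
      conv_lhs => rw [← hsplit]
      rw [pvLoopA_nonhdr _ hpre]
      rw [pvMain (lines.dropWhile (fun l => !pvIsHeader l)).length _ le_rfl hshape]
    show PySem.Str.rstrip (PySem.Str.join "\n"
        (if (lines.foldl pvStepA (false, false, [])).1 && !(lines.foldl pvStepA (false, false, [])).2.1
         then (lines.foldl pvStepA (false, false, [])).2.2 ++ ["codex_hooks = true"]
         else (lines.foldl pvStepA (false, false, [])).2.2)) ++ "\n"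
      = PySem.Str.rstrip (PySem.Str.join "\n"
          (lines.takeWhile (fun l => !pvIsHeader l) ++ pvAltGo false (lines.dropWhile (fun l => !pvIsHeader l)))) ++ "\n"
    have e : pvFlush (lines.foldl pvStepA (false, false, [])) =
        (if (lines.foldl pvStepA (false, false, [])).1 && !(lines.foldl pvStepA (false, false, [])).2.1
         then (lines.foldl pvStepA (false, false, [])).2.2 ++ ["codex_hooks = true"]
         else (lines.foldl pvStepA (false, false, [])).2.2) := rfl
    rw [← e, hfold, hkey]
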